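-- pv_equiv track=rewrite | github.com/takechi-scratch/atcoder | abc422/c/main.py | solve
-- ===== SOURCE A (Python) =====
-- def solve(A: int, B: int, C: int) -> int:
--     # 決め打ちにぶたん。AとCを確保し、かつ合計の文字数が足りていればOK
--     ok, ng = 0, 10 ** 18
--     while ng - ok > 1:
--         test = (ok + ng) // 2
--         if A >= test and C >= test and A + B + C >= test * 3:
--             ok = test
--         else:
--             ng = test
--
--     return ok
-- ===== SOURCE B (Python) =====
-- def solve(A: int, B: int, C: int) -> int:
--     # Closed form of the monotone predicate the binary search optimizes.
--     return max(0, min(A, C, (A + B + C) // 3))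
-- ===== Notes on version B (the rewrite author's own statement) =====
-- stated objective: faster
-- what changed: Replaced the ~60-iteration binary search over [0,10^18) by the closed form max(0, min(A, C, (A+B+C)//3)).
import Mathlib
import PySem

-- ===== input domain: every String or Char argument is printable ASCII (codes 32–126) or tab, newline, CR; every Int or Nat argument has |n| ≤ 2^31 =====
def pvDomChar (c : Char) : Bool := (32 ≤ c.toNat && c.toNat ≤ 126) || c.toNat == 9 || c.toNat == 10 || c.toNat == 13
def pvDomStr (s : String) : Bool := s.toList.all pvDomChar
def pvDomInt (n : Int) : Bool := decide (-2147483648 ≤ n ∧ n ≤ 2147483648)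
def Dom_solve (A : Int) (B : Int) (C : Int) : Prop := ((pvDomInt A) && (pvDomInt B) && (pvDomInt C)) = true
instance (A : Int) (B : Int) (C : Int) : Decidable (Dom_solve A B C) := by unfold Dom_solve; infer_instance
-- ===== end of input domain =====

-- B replaces A's binary search by the closed form max(0, min(A, C, (A+B+C)//3)) (faster: O(1) vs ~60 bisection steps).


-- ===== PORT A =====
-- while ng - ok > 1: test = (ok+ng)//2; move ok or ng
def solveLoop (A B C ok ng : Int) : Int :=
  if h : ng - ok > 1 then
    let test := PySem.Int.floordiv (ok + ng) 2
    if A ≥ test ∧ C ≥ test ∧ A + B + C ≥ test * 3 then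
      solveLoop A B C test ng
    else
      solveLoop A B C ok test
  else ok
termination_by (ng - ok).toNat
decreasing_by
  · have := (PySem.Int.floordiv_two_mid_bounds (lo := ok) (hi := ng) (by omega)).1
    have h2 : PySem.Int.floordiv (ok + ng) 2 = (ok + ng) / 2 :=
      PySem.Int.floordiv_eq_ediv_of_pos (by omega)
    omega
  · have h2 : PySem.Int.floordiv (ok + ng) 2 = (ok + ng) / 2 :=
      PySem.Int.floordiv_eq_ediv_of_pos (by omega)
    omega

def solve (A : Int) (B : Int) (C : Int) : Int :=
  solveLoop A B C 0 (10 ^ 18)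

-- ===== PORT B =====
def solve_alt (A : Int) (B : Int) (C : Int) : Int :=
  max 0 (min A (min C (PySem.Int.floordiv (A + B + C) 3)))

-- ===== PRECONDITION & SPEC =====
def Spec_solve (A : Int) (B : Int) (C : Int) (out : Int) : Prop := out = solve_alt A B C
instance (A : Int) (B : Int) (C : Int) (out : Int) : Decidable (Spec_solve A B C out) := by unfold Spec_solve; infer_instance

-- ===== CLAIM (what is proved, stated in full; the proofs are below) =====
def Claim_equal_solve : Prop := ∀ (A : Int) (B : Int) (C : Int), Dom_solve A B C → Spec_solve A B C (solve A B C)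

-- ===== LEMMAS AND PROOFS =====

-- the predicate A's loop tests, as an upper bound: good t ↔ t ≤ m where m = min A (min C ((A+B+C)//3))
theorem good_iff_le (A B C t : Int) :
    (A ≥ t ∧ C ≥ t ∧ A + B + C ≥ t * 3) ↔ t ≤ min A (min C (PySem.Int.floordiv (A + B + C) 3)) := by
  have h3 : PySem.Int.floordiv (A + B + C) 3 = (A + B + C) / 3 :=
    PySem.Int.floordiv_eq_ediv_of_pos (by omega)
  rw [h3]
  simp only [le_min_iff]
  omega

-- loop invariant: ok = 0 or good ok; ¬ good ng; 0 ≤ ok < ng ⇒ the loop returns max 0 m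
theorem solveLoop_eq (A B C : Int) (m : Int)
    (hm : m = min A (min C (PySem.Int.floordiv (A + B + C) 3))) :
    ∀ ok ng : Int, 0 ≤ ok → ok < ng → (ok = 0 ∨ ok ≤ m) → ¬ ng ≤ m →
      solveLoop A B C ok ng = max 0 m := by
  intro ok ng
  induction ok, ng using solveLoop.induct A B C with
  | case1 ok ng h test hgood ih =>
    intro h0 hlt hok hng
    have hb := PySem.Int.floordiv_two_mid_bounds (lo := ok) (hi := ng) (by omega)
    have h2 : test = (ok + ng) / 2 := PySem.Int.floordiv_eq_ediv_of_pos (by omega)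
    rw [solveLoop, dif_pos h, if_pos hgood]
    have htm : test ≤ m := (good_iff_le A B C test).mp hgood |>.trans_eq hm.symm
    exact ih (by omega) (by omega) (Or.inr htm) hng
  | case2 ok ng h test hgood ih =>
    intro h0 hlt hok hng
    have hb := PySem.Int.floordiv_two_mid_bounds (lo := ok) (hi := ng) (by omega)
    have h2 : test = (ok + ng) / 2 := PySem.Int.floordiv_eq_ediv_of_pos (by omega)
    rw [solveLoop, dif_pos h, if_neg hgood]
    have htm : ¬ test ≤ m := fun hle =>
      hgood ((good_iff_le A B C test).mpr (hm ▸ hle))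
    exact ih (by omega) (by omega) hok htm
  | case3 ok ng h =>
    intro h0 hlt hok hng
    rw [solveLoop]
    simp only [dif_neg h]
    rcases hok with rfl | hle <;> omega

theorem solve_spec' (A B C : Int) (hd : Dom_solve A B C) :
    solve A B C = solve_alt A B C := by
  have hA : A ≤ 2147483648 ∧ C ≤ 2147483648 := by
    simp [Dom_solve, pvDomInt] at hd; omega
  have h3 : PySem.Int.floordiv (A + B + C) 3 = (A + B + C) / 3 :=
    PySem.Int.floordiv_eq_ediv_of_pos (by omega)
  have hng : ¬ (10 ^ 18 : Int) ≤ min A (min C (PySem.Int.floordiv (A + B + C) 3)) := by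
    simp only [le_min_iff, h3]; omega
  exact solveLoop_eq A B C _ rfl 0 (10 ^ 18) le_rfl (by norm_num) (Or.inl rfl) hng

-- ===== VERDICT (by name: the statement is the Claim_ definition above) =====
theorem solve_spec : Claim_equal_solve := by
  intro A B C hd
  exact solve_spec' A B C hd
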